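-- pv_equiv track=rewrite | github.com/derekmeegan/ir_automation | scripts/pr_parser.py | group_non_whitespace_lines
-- ===== SOURCE A (Python) =====
-- def group_non_whitespace_lines(lines):
--     groups = []
--     current_group = []
--
--     for line in lines:
--         # Check if the line is only whitespace characters (\xa0, \n, \t, spaces)
--         if line.strip() in ["", "\xa0"]:
--             if current_group:
--                 groups.append(current_group)
--                 current_group = []
--         else:
--             current_group.append(line.strip())
--
--     # Add the last group if not empty
--     if current_group:
--         groups.append(current_group)
--
--     return groups
-- ===== SOURCE B (Python) =====
-- def group_non_whitespace_lines(lines):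
--     def blank(l):
--         return l.strip() in ("", "\xa0")
--     groups = []
--     i, n = 0, len(lines)
--     while i < n:
--         if blank(lines[i]):
--             i += 1
--         else:
--             j = i
--             while j < n and not blank(lines[j]):
--                 j += 1
--             groups.append([l.strip() for l in lines[i:j]])
--             i = j
--     return groups
-- ===== Notes on version B (the rewrite author's own statement) =====
-- stated objective: alternative
-- what changed: Replaces the accumulator-and-flush state machine with a two-pointer run scanner: an index scans forward, detects each maximal run of non-whitespace lines, and emits the stripped run as one group.
import Mathlib
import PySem

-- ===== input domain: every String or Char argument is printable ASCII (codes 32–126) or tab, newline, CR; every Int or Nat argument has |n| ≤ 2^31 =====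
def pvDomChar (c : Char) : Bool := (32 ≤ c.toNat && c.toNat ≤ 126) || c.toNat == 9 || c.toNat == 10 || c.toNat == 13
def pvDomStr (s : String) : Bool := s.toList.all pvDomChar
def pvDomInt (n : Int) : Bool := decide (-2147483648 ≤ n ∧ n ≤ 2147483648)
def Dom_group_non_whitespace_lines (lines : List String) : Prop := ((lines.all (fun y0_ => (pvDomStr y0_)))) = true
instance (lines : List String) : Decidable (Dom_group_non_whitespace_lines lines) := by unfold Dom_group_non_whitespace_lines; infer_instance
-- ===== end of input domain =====

-- B replaces A's accumulator-and-flush state machine with a two-pointer run scanner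
-- (find each maximal run of non-whitespace lines, emit it stripped); same cost, alternative structure.

-- the test `line.strip() in ["", "\xa0"]` shared by both Pythons
def pvBlank (l : String) : Bool :=
  PySem.Str.strip l == "" || PySem.Str.strip l == "\u00A0"

-- ===== PORT A =====
-- A's loop: state (groups, current_group), flushed on whitespace lines and at the end
def pvGoA (groups : List (List String)) (current : List String) :
    List String → List (List String)
  | [] => if current = [] then groups else groups ++ [current]
  | l :: ls =>
    if pvBlank l then
      if current = [] then pvGoA groups [] ls
      else pvGoA (groups ++ [current]) [] ls
    else pvGoA groups (current ++ [PySem.Str.strip l]) ls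

def group_non_whitespace_lines (lines : List String) : List (List String) :=
  pvGoA [] [] lines

-- ===== PORT B =====
-- B's outer while over the remaining suffix: skip a blank line, or take the maximal
-- non-blank run (inner while / lines[i:j]) and emit it stripped.
def pvScanB (lines : List String) : List (List String) :=
  match lines with
  | [] => []
  | l :: ls =>
    if pvBlank l then pvScanB ls
    else
      ((l :: ls).takeWhile (fun x => !pvBlank x)).map PySem.Str.strip ::
        pvScanB ((l :: ls).dropWhile (fun x => !pvBlank x))
termination_by lines.length
decreasing_by
  · simp
  · simp only [List.dropWhile_cons]
    simp_all
    exact List.length_dropWhile_le _ _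

def group_non_whitespace_lines_alt (lines : List String) : List (List String) :=
  pvScanB lines

-- ===== PRECONDITION & SPEC =====
def Spec_group_non_whitespace_lines (lines : List String) (out : List (List String)) : Prop := out = group_non_whitespace_lines_alt lines
instance (lines : List String) (out : List (List String)) : Decidable (Spec_group_non_whitespace_lines lines out) := by unfold Spec_group_non_whitespace_lines; infer_instance

-- ===== CLAIM (what is proved, stated in full; the proofs are below) =====
def Claim_equal_group_non_whitespace_lines : Prop := ∀ (lines : List String), Dom_group_non_whitespace_lines lines → Spec_group_non_whitespace_lines lines (group_non_whitespace_lines lines)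

-- ===== LEMMAS AND PROOFS =====

-- already-collected groups are a passive prefix of A's state machine
theorem pvGoA_prefix (ls : List String) :
    ∀ (groups : List (List String)) (current : List String),
      pvGoA groups current ls = groups ++ pvGoA [] current ls := by
  induction ls with
  | nil =>
    intro groups current
    by_cases h : current = [] <;> simp [pvGoA, h]
  | cons l ls ih =>
    intro groups current
    by_cases hb : pvBlank l
    · by_cases hc : current = []
      · subst hc
        simp only [pvGoA, hb, if_true]
        simpa using ih groups []
      · simp only [pvGoA, hb, hc, if_true, if_false, List.nil_append]
        rw [ih (groups ++ [current]) [], ih [current] []]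
        simp
    · simp only [pvGoA, hb]
      rw [ih groups (current ++ [PySem.Str.strip l]),
          ih [] (current ++ [PySem.Str.strip l])]
      simp

-- A's state machine computes B's run decomposition (joint invariant over the suffix)
theorem pvGoA_eq_scan (ls : List String) :
    pvGoA [] [] ls = pvScanB ls ∧
    ∀ current, current ≠ [] →
      pvGoA [] current ls =
        (current ++ (ls.takeWhile (fun x => !pvBlank x)).map PySem.Str.strip) ::
          pvScanB (ls.dropWhile (fun x => !pvBlank x)) := by
  induction ls with
  | nil =>
    refine ⟨by simp [pvGoA, pvScanB], ?_⟩
    intro current hc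
    simp [pvGoA, pvScanB, hc]
  | cons l ls ih =>
    obtain ⟨ih1, ih2⟩ := ih
    by_cases hb : pvBlank l
    · constructor
      · simp [pvGoA, pvScanB, hb, ih1]
      · intro current hc
        simp only [pvGoA, hb, if_true, hc, if_false]
        rw [pvGoA_prefix, ih1]
        simp [pvScanB, hb]
    · constructor
      · simp only [pvGoA, hb, List.nil_append]
        rw [ih2 [PySem.Str.strip l] (by simp)]
        simp [pvScanB, hb]
      · intro current hc
        simp only [pvGoA, hb]
        rw [ih2 (current ++ [PySem.Str.strip l]) (by simp)]
        simp [hb]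

-- ===== VERDICT (by name: the statement is the Claim_ definition above) =====
theorem group_non_whitespace_lines_spec : Claim_equal_group_non_whitespace_lines := by
  intro lines _
  unfold Spec_group_non_whitespace_lines group_non_whitespace_lines group_non_whitespace_lines_alt
  exact (pvGoA_eq_scan lines).1
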